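-- pv_equiv track=rewrite | github.com/DevShel/leetcode-problems | backtracking/palindrome_partitioning.py | all_palindromes_at_index
-- ===== SOURCE A (Python) =====
-- def all_palindromes_at_index(s, i):
--     palindrome_list = []
--     # For every possible substring starting at curr index
--     for j in range(i + 1, len(s)):
--         # Determine if this substring is a palindrome
--         is_palindrome = True
--         l_ptr, r_ptr = i, j
--         while (r_ptr > l_ptr):
--             if (s[l_ptr] != s[r_ptr]):
--                 is_palindrome = False
--                 break
--             r_ptr = r_ptr - 1
--             l_ptr = l_ptr + 1
--
--         if (is_palindrome): palindrome_list.append(s[i:j+1])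
--         print (palindrome_list)
--     return palindrome_list
-- ===== SOURCE B (Python) =====
-- def all_palindromes_at_index(s, i):
--     # DP palindrome table: is_pal[(l, r)] says s[l..r] is a palindrome (0 <= l <= r < n)
--     n = len(s)
--     is_pal = {}
--     for l in range(n - 1, -1, -1):
--         for r in range(l, n):
--             is_pal[(l, r)] = s[l] == s[r] and (r - l < 2 or is_pal[(l + 1, r - 1)])
--     palindrome_list = []
--     for j in range(i + 1, n):
--         if is_pal.get((i, j), False):
--             palindrome_list.append(s[i:j+1])
--         print(palindrome_list)
--     return palindrome_list
-- ===== Notes on version B (the rewrite author's own statement) =====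
-- stated objective: alternative
-- what changed: B replaces A's per-j two-pointer palindrome rescan with a dynamic-programming palindrome table (a dict keyed by (l,r) filled by the recurrence isPal[l][r] = s[l]==s[r] and (r-l<2 or isPal[l+1][r-1])) that the unchanged outer loop merely looks up.
-- outside the precondition, e.g. on all_palindromes_at_index('aa', -1): A returns ['', 'a'], B returns []
import Mathlib
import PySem

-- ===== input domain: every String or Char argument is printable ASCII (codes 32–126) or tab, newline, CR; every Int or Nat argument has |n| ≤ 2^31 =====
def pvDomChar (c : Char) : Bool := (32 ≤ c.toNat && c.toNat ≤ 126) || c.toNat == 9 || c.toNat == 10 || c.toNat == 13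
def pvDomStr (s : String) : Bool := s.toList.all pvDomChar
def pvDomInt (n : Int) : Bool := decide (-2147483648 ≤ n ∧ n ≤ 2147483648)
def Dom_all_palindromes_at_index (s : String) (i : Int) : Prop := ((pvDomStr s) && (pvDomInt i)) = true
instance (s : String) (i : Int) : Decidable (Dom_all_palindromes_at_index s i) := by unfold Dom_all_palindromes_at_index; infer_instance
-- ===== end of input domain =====

-- B replaces A's per-j two-pointer rescan by a precomputed DP palindrome table (same outer loop, lookups instead of scans);
-- equivalence is about the RETURN value only — both Pythons also print the running list each iteration, identically on Pre_.

-- ===== PORT A =====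
-- the inner 'while r_ptr > l_ptr' loop of A; fuel (r-l).toNat is enough since r-l shrinks by 2 each pass
def pvPalWhile (cs : List Char) : Nat → Int → Int → Bool
  | 0, _, _ => true
  | fuel+1, l, r =>
    if r > l then
      if PySem.List.pyGet? cs l ≠ PySem.List.pyGet? cs r then false
      else pvPalWhile cs fuel (l+1) (r-1)
    else true

def all_palindromes_at_index (s : String) (i : Int) : List String :=
  (PySem.List.pyRange (i+1) (s.toList.length : Int) 1).foldl
    (fun acc j =>
      if pvPalWhile s.toList ((j - i).toNat) i j
      then acc ++ [String.ofList (PySem.List.slice s.toList (some i) (some (j+1)))]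
      else acc) []

-- ===== PORT B =====
-- the two nested 'for' loops of Source B filling the dict is_pal
def pvBuildTable (cs : List Char) : PySem.Dict (Int × Int) Bool :=
  (PySem.List.pyRange ((cs.length : Int) - 1) (-1) (-1)).foldl
    (fun d l =>
      (PySem.List.pyRange l (cs.length : Int) 1).foldl
        (fun d r =>
          d.insert (l, r)
            ((PySem.List.pyGet? cs l == PySem.List.pyGet? cs r) &&
             (decide (r - l < 2) || d.getD (l+1, r-1) false))) d)
    PySem.Dict.empty

def all_palindromes_at_index_alt (s : String) (i : Int) : List String :=
  (PySem.List.pyRange (i+1) (s.toList.length : Int) 1).foldl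
    (fun acc j =>
      if (pvBuildTable s.toList).getD (i, j) false
      then acc ++ [String.ofList (PySem.List.slice s.toList (some i) (some (j+1)))]
      else acc) []

-- ===== PRECONDITION & SPEC =====
-- Pre_ excludes negative i, outside the function's natural start-index domain: there A either raises IndexError
-- (i < -len(s)) or returns values produced by Python's negative-index wraparound, which B's 0-based table does not reproduce.
def Pre_all_palindromes_at_index (s : String) (i : Int) : Prop := 0 ≤ i
instance (s : String) (i : Int) : Decidable (Pre_all_palindromes_at_index s i) := by unfold Pre_all_palindromes_at_index; infer_instance

def pvWitness_all_palindromes_at_index : String × Int := ("aba", 0)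

def Spec_all_palindromes_at_index (s : String) (i : Int) (out : List String) : Prop := out = all_palindromes_at_index_alt s i
instance (s : String) (i : Int) (out : List String) : Decidable (Spec_all_palindromes_at_index s i out) := by unfold Spec_all_palindromes_at_index; infer_instance

-- ===== CLAIM (what is proved, stated in full; the proofs are below) =====
def Claim_equal_all_palindromes_at_index : Prop := ∀ (s : String) (i : Int), Dom_all_palindromes_at_index s i → Pre_all_palindromes_at_index s i → Spec_all_palindromes_at_index s i (all_palindromes_at_index s i)

-- ===== LEMMAS AND PROOFS =====

-- common functional meaning of one palindrome test, by the DP recurrence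
def palF (cs : List Char) (l r : Int) : Bool :=
  if r - l < 2 then PySem.List.pyGet? cs l == PySem.List.pyGet? cs r
  else (PySem.List.pyGet? cs l == PySem.List.pyGet? cs r) && palF cs (l+1) (r-1)
termination_by (r - l).toNat
decreasing_by simp; omega

theorem palF_self (cs : List Char) (l : Int) : palF cs l l = true := by
  unfold palF; simp

theorem pvPalWhile_succ (cs : List Char) (fuel : Nat) (l r : Int) :
    pvPalWhile cs (fuel+1) l r =
      if r > l then
        if PySem.List.pyGet? cs l ≠ PySem.List.pyGet? cs r then false
        else pvPalWhile cs fuel (l+1) (r-1)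
      else true := rfl

theorem pvPalWhile_of_le (cs : List Char) (fuel : Nat) (l r : Int) (h : r ≤ l) :
    pvPalWhile cs fuel l r = true := by
  cases fuel with
  | zero => rfl
  | succ f => rw [pvPalWhile_succ, if_neg (by omega)]

theorem pvPalWhile_eq_palF (cs : List Char) : ∀ (fuel : Nat) (l r : Int),
    r - l ≤ 2 * (fuel : Int) → l < r → pvPalWhile cs fuel l r = palF cs l r := by
  intro fuel
  induction fuel with
  | zero => intro l r h hlr; exfalso; omega
  | succ fuel ih =>
    intro l r h hlr
    rw [pvPalWhile_succ, if_pos hlr]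
    by_cases heq : PySem.List.pyGet? cs l = PySem.List.pyGet? cs r
    · rw [if_neg (by simp [heq])]
      by_cases hlt : r - l < 2
      · have hr1 : r - 1 = l := by omega
        rw [hr1, pvPalWhile_of_le cs fuel (l+1) l (by omega)]
        rw [palF, if_pos hlt, heq]
        simp
      · rw [palF, if_neg hlt, heq]
        simp only [BEq.rfl, Bool.true_and]
        by_cases h2 : l + 1 < r - 1
        · exact ih (l+1) (r-1) (by push_cast at h ⊢; omega) h2
        · have hre : r - 1 = l + 1 := by omega
          rw [hre, palF_self]
          exact pvPalWhile_of_le cs fuel (l+1) (l+1) (by omega)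
    · rw [if_pos (by simp [heq])]
      rw [palF]
      have hb : (PySem.List.pyGet? cs l == PySem.List.pyGet? cs r) = false := by
        simp [heq]
      split_ifs <;> simp [hb]

-- the inner row loop establishes row l of the table and preserves the rows above it
theorem pvInner_inv (cs : List Char) (l : Int) :
    ∀ (a : Int) (d : PySem.Dict (Int × Int) Bool), l ≤ a →
    (∀ l' r', l < l' → l' ≤ r' → r' < (cs.length : Int) →
        d.getD (l', r') false = palF cs l' r') →
    (∀ r', l ≤ r' → r' < a → d.getD (l, r') false = palF cs l r') →
    (∀ l' r', l ≤ l' → l' ≤ r' → r' < (cs.length : Int) →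
      ((PySem.List.pyRange a (cs.length : Int) 1).foldl
        (fun d r =>
          d.insert (l, r)
            ((PySem.List.pyGet? cs l == PySem.List.pyGet? cs r) &&
             (decide (r - l < 2) || d.getD (l+1, r-1) false))) d).getD (l', r') false
        = palF cs l' r') := by
  intro a
  by_cases hterm : a < (cs.length : Int)
  case neg =>
    intro d hla hup hrow l' r' h1 h2 h3
    rw [PySem.List.pyRange_one_eq_nil (by omega)]
    simp only [List.foldl_nil]
    rcases eq_or_lt_of_le h1 with he | hl
    · subst he
      exact hrow r' h2 (by omega)
    · exact hup l' r' hl h2 h3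
  case pos =>
    intro d hla hup hrow l' r' h1 h2 h3
    rw [PySem.List.pyRange_one_cons hterm]
    simp only [List.foldl_cons]
    have hval : (d.insert (l, a)
        ((PySem.List.pyGet? cs l == PySem.List.pyGet? cs a) &&
         (decide (a - l < 2) || d.getD (l+1, a-1) false))).getD (l, a) false = palF cs l a := by
      rw [PySem.Dict.getD_insert_self]
      by_cases hsm : a - l < 2
      · rw [palF, if_pos hsm]; simp [hsm]
      · rw [palF, if_neg hsm]
        simp only [hsm, decide_false, Bool.false_or]
        rw [hup (l+1) (a-1) (by omega) (by omega) (by omega)]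
    exact pvInner_inv cs l (a+1)
      (d.insert (l, a)
        ((PySem.List.pyGet? cs l == PySem.List.pyGet? cs a) &&
         (decide (a - l < 2) || d.getD (l+1, a-1) false)))
      (by omega)
      (by
        intro l'' r'' g1 g2 g3
        rw [PySem.Dict.getD_insert, if_neg (by intro h; injection h with hx hy; omega)]
        exact hup l'' r'' g1 g2 g3)
      (by
        intro r'' g1 g2
        by_cases hre : r'' = a
        · subst hre; exact hval
        · rw [PySem.Dict.getD_insert, if_neg (by intro h; injection h with hx hy; exact hre hy)]
          exact hrow r'' g1 (by omega))
      l' r' h1 h2 h3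
termination_by a => ((cs.length : Int) - a).toNat
decreasing_by omega

-- the outer loop, counting rows down from l0, fills every row from 0 up
theorem pvOuter_inv (cs : List Char) :
    ∀ (l0 : Int) (d : PySem.Dict (Int × Int) Bool),
    (∀ l' r', l0 < l' → l' ≤ r' → r' < (cs.length : Int) →
        d.getD (l', r') false = palF cs l' r') →
    (∀ l' r', 0 ≤ l' → l' ≤ r' → r' < (cs.length : Int) →
      ((PySem.List.pyRange l0 (-1) (-1)).foldl
        (fun d l =>
          (PySem.List.pyRange l (cs.length : Int) 1).foldl
            (fun d r =>
              d.insert (l, r)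
                ((PySem.List.pyGet? cs l == PySem.List.pyGet? cs r) &&
                 (decide (r - l < 2) || d.getD (l+1, r-1) false))) d) d).getD (l', r') false
        = palF cs l' r') := by
  intro l0
  by_cases hneg : l0 ≤ -1
  case pos =>
    intro d hup l' r' h1 h2 h3
    rw [PySem.List.pyRange_neg_one_eq_nil hneg]
    simp only [List.foldl_nil]
    exact hup l' r' (by omega) h2 h3
  case neg =>
    intro d hup l' r' h1 h2 h3
    rw [PySem.List.pyRange_neg_one_cons (by omega)]
    simp only [List.foldl_cons]
    exact pvOuter_inv cs (l0 - 1)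
      ((PySem.List.pyRange l0 (cs.length : Int) 1).foldl
        (fun d r =>
          d.insert (l0, r)
            ((PySem.List.pyGet? cs l0 == PySem.List.pyGet? cs r) &&
             (decide (r - l0 < 2) || d.getD (l0+1, r-1) false))) d)
      (fun a b p q w =>
        pvInner_inv cs l0 l0 d (le_refl l0)
          (fun x y p' q' w' => hup x y p' q' w')
          (fun x p' q' => absurd q' (by omega))
          a b (by omega) q w)
      l' r' h1 h2 h3
termination_by l0 => (l0 + 1).toNat
decreasing_by omega

theorem pvBuildTable_getD (cs : List Char) (l r : Int)
    (h0 : 0 ≤ l) (hlr : l ≤ r) (hr : r < (cs.length : Int)) :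
    (pvBuildTable cs).getD (l, r) false = palF cs l r := by
  unfold pvBuildTable
  exact pvOuter_inv cs ((cs.length : Int) - 1) PySem.Dict.empty
    (fun a b p q w => absurd q (by omega)) l r h0 hlr hr

-- ===== VERDICT (by name: the statement is the Claim_ definition above) =====
theorem all_palindromes_at_index_spec : Claim_equal_all_palindromes_at_index := by
  intro s i _hdom hpre
  unfold Spec_all_palindromes_at_index
  unfold all_palindromes_at_index all_palindromes_at_index_alt
  apply PySem.List.foldl_congr_mem
  intro acc j hj
  rw [PySem.List.mem_pyRange_one] at hj
  have hiw : pvPalWhile s.toList ((j - i).toNat) i j = palF s.toList i j :=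
    pvPalWhile_eq_palF s.toList ((j - i).toNat) i j (by omega) (by omega)
  have htb : (pvBuildTable s.toList).getD (i, j) false = palF s.toList i j :=
    pvBuildTable_getD s.toList i j hpre (by omega) (by omega)
  rw [hiw, htb]
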